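-- pv_equiv track=rewrite | github.com/LakdiluA12X/Smart-Energy-Meter | WEB/randGen.py | date_gen
-- ===== SOURCE A (Python) =====
-- def date_gen(year, month):
--     long = [1,3,5,7,8,10,12]
--     dates = []
--
--     for i in range(1, 32):
--         dates.append(str(year) + str(month).zfill(2) + str(i).zfill(2))
--
--         if(month == 2 and i >= 28):
--             break
--
--         if(month not in long and i >= 30):
--             break
--
--     return dates
-- ===== SOURCE B (Python) =====
-- def date_gen(year, month):
--     days = 28 if month == 2 else (31 if month in [1, 3, 5, 7, 8, 10, 12] else 30)
--     return [str(year) + str(month).zfill(2) + str(i).zfill(2) for i in range(1, days + 1)]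
-- ===== Notes on version B (the rewrite author's own statement) =====
-- stated objective: simpler
-- what changed: B precomputes the terminal day count (28/31/30, keeping A's no-leap-year Feb and 30-day fallback for out-of-range months) and builds the list in one comprehension, instead of A's 31-iteration loop with two conditional breaks.
import Mathlib
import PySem

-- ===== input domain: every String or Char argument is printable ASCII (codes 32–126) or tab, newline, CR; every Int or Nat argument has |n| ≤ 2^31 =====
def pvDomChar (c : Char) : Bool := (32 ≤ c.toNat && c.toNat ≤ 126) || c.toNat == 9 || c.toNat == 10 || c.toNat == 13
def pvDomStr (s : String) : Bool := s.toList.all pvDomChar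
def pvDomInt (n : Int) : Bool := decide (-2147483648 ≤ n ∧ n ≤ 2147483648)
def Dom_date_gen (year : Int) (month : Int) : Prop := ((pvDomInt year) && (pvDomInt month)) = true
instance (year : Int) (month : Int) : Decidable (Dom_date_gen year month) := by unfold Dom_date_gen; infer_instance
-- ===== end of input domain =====

-- B precomputes the day count and builds the list in one comprehension; A loops to 31 with two breaks. Same values everywhere.

-- ===== PORT A =====
-- the loop over range(1, 32) with its two 'break's, as structural recursion on the remaining indices
def dateGenLoop (year month : Int) (is : List Int) (dates : List String) : List String :=
  match is with
  | [] => dates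
  | i :: rest =>
    let dates := dates ++ [PySem.Int.toStr year ++ PySem.Str.zfill (PySem.Int.toStr month) 2 ++ PySem.Str.zfill (PySem.Int.toStr i) 2]
    if month = 2 ∧ 28 ≤ i then dates
    else if month ∉ ([1,3,5,7,8,10,12] : List Int) ∧ 30 ≤ i then dates
    else dateGenLoop year month rest dates

def date_gen (year : Int) (month : Int) : List String :=
  dateGenLoop year month (PySem.List.pyRange 1 32 1) []

-- ===== PORT B =====
def date_gen_alt (year : Int) (month : Int) : List String :=
  let days : Int := if month = 2 then 28 else if month ∈ ([1,3,5,7,8,10,12] : List Int) then 31 else 30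
  (PySem.List.pyRange 1 (days + 1) 1).map
    (fun i => PySem.Int.toStr year ++ PySem.Str.zfill (PySem.Int.toStr month) 2 ++ PySem.Str.zfill (PySem.Int.toStr i) 2)

-- ===== PRECONDITION & SPEC =====
def Spec_date_gen (year : Int) (month : Int) (out : List String) : Prop := out = date_gen_alt year month
instance (year : Int) (month : Int) (out : List String) : Decidable (Spec_date_gen year month out) := by unfold Spec_date_gen; infer_instance

-- ===== CLAIM (what is proved, stated in full; the proofs are below) =====
def Claim_equal_date_gen : Prop := ∀ (year : Int) (month : Int), Dom_date_gen year month → Spec_date_gen year month (date_gen year month)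

-- ===== LEMMAS AND PROOFS =====

-- ===== VERDICT (by name: the statement is the Claim_ definition above) =====
theorem date_gen_spec : Claim_equal_date_gen := by
  intro year month _
  have hr : PySem.List.pyRange 1 32 1 = ([1,2,3,4,5,6,7,8,9,10,11,12,13,14,15,16,17,18,19,20,21,22,23,24,25,26,27,28,29,30,31] : List Int) := by decide
  have h28 : PySem.List.pyRange 1 29 1 = ([1,2,3,4,5,6,7,8,9,10,11,12,13,14,15,16,17,18,19,20,21,22,23,24,25,26,27,28] : List Int) := by decide
  have h31 : PySem.List.pyRange 1 32 1 = ([1,2,3,4,5,6,7,8,9,10,11,12,13,14,15,16,17,18,19,20,21,22,23,24,25,26,27,28,29,30,31] : List Int) := by decide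
  have h30 : PySem.List.pyRange 1 31 1 = ([1,2,3,4,5,6,7,8,9,10,11,12,13,14,15,16,17,18,19,20,21,22,23,24,25,26,27,28,29,30] : List Int) := by decide
  unfold Spec_date_gen date_gen date_gen_alt
  by_cases h2 : month = 2
  · subst h2
    rw [hr]
    simp [dateGenLoop, h28]
  · by_cases hl : month ∈ ([1,3,5,7,8,10,12] : List Int)
    · rw [hr]
      simp only [if_neg h2, if_pos hl]
      simp [dateGenLoop, h2, hl, h31]
    · rw [hr]
      simp only [if_neg h2, if_neg hl]
      simp [dateGenLoop, h2, hl, h30]
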